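-- pv_equiv track=rewrite | github.com/HelloSSIFI/HelloWorld | programmers/Lv3_공_이동_시뮬레이션/s1_hyg4779.py | solution
-- ===== SOURCE A (Python) =====
-- def solution(n, m, x, y, queries):
--
--     si, sj, ei, ej = x, y, x, y
--
--     for idx, power in queries[::-1]:
--         # 열 감소
--         if idx == 0:
--             if sj == 0:
--                 ej = min(m-1, ej+power)
--             else:
--                 if sj+power >= m:return 0
--
--                 sj = min(m-1, sj+power)
--                 ej = min(m-1, ej+power)
--
--         # 열 증가
--         elif idx == 1:
--             if ej == m-1:
--                 sj = max(0, sj-power)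
--             else:
--                 if ej-power < 0: return 0
--
--                 sj = max(0, sj-power)
--                 ej = max(0, ej-power)
--
--         # 행 감소
--         elif idx == 2:
--             if si == 0:
--                 ei = min(n-1, ei+power)
--             else:
--                 if si+power >= n: return 0
--
--                 si = min(n-1, si+power)
--                 ei = min(n-1, ei+power)
--
--         # 행 증가
--         else:
--             if ei == n-1:
--                 si = max(0, si-power)
--             else:
--                 if ei+power < 0: return 0
--
--                 si = max(0, si-power)
--                 ei = max(0, ei-power)
--
--     return (ei-si+1)*(ej-sj+1)
-- ===== SOURCE B (Python) =====
-- def _cols(qs, s, e, m):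
--     # reverse pass over the column queries only (idx 0/1); None = impossible
--     for idx, power in qs:
--         if idx == 0:
--             if s == 0:
--                 e = min(m - 1, e + power)
--             else:
--                 if s + power >= m:
--                     return None
--                 s = min(m - 1, s + power)
--                 e = min(m - 1, e + power)
--         else:
--             if e == m - 1:
--                 s = max(0, s - power)
--             else:
--                 if e - power < 0:
--                     return None
--                 s = max(0, s - power)
--                 e = max(0, e - power)
--     return e - s + 1
--
--
-- def _rows(qs, s, e, n):
--     # reverse pass over the row queries only (idx 2 and the catch-all branch)
--     for idx, power in qs:
--         if idx == 2:
--             if s == 0: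
--                 e = min(n - 1, e + power)
--             else:
--                 if s + power >= n:
--                     return None
--                 s = min(n - 1, s + power)
--                 e = min(n - 1, e + power)
--         else:
--             if e == n - 1:
--                 s = max(0, s - power)
--             else:
--                 if e + power < 0:
--                     return None
--                 s = max(0, s - power)
--                 e = max(0, e - power)
--     return e - s + 1
--
--
-- def solution(n, m, x, y, queries):
--     rev = queries[::-1]
--     w = _cols([q for q in rev if q[0] == 0 or q[0] == 1], y, y, m)
--     h = _rows([q for q in rev if not (q[0] == 0 or q[0] == 1)], x, x, n)
--     return 0 if w is None or h is None else w * h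
-- ===== Notes on version B (the rewrite author's own statement) =====
-- stated objective: alternative
-- what changed: B splits the reversed query list into the column group (idx 0/1) and the row group (everything else), runs an independent two-branch 1D reverse pass on each group to get the surviving width and height (None = impossible), and returns their product (0 if either pass fails), instead of A's single interleaved four-branch loop with early returns.
import Mathlib
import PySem

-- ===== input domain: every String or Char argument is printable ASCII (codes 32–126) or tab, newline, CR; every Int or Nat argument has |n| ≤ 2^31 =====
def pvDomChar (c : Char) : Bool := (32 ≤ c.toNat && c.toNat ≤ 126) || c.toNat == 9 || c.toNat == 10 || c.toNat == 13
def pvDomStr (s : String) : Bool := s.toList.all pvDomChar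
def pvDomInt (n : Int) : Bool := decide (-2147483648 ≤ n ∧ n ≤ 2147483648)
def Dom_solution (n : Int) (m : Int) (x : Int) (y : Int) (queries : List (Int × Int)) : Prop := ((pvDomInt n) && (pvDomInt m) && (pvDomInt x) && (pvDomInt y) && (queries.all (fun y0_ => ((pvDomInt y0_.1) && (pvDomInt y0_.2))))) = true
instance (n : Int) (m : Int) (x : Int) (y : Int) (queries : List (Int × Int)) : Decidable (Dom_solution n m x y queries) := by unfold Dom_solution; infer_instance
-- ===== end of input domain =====

-- B replaces A's single interleaved four-branch reverse loop by two independent 1D reverse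
-- passes over the column-query group and the row-query group, multiplying the two extents
-- (objective: alternative decomposition; same cost).

-- ===== PORT A =====
-- the single reverse loop of A over state (si, sj, ei, ej); early `return 0` becomes a 0 result
def loopA (n : Int) (m : Int) : List (Int × Int) → Int → Int → Int → Int → Int
  | [], si, sj, ei, ej => (ei - si + 1) * (ej - sj + 1)
  | (idx, power) :: rest, si, sj, ei, ej =>
    if idx = 0 then
      if sj = 0 then loopA n m rest si sj ei (min (m - 1) (ej + power))
      else if sj + power ≥ m then 0
      else loopA n m rest si (min (m - 1) (sj + power)) ei (min (m - 1) (ej + power))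
    else if idx = 1 then
      if ej = m - 1 then loopA n m rest si (max 0 (sj - power)) ei ej
      else if ej - power < 0 then 0
      else loopA n m rest si (max 0 (sj - power)) ei (max 0 (ej - power))
    else if idx = 2 then
      if si = 0 then loopA n m rest si sj (min (n - 1) (ei + power)) ej
      else if si + power ≥ n then 0
      else loopA n m rest (min (n - 1) (si + power)) sj (min (n - 1) (ei + power)) ej
    else
      if ei = n - 1 then loopA n m rest (max 0 (si - power)) sj ei ej
      else if ei + power < 0 then 0
      else loopA n m rest (max 0 (si - power)) sj (max 0 (ei - power)) ej

def solution (n : Int) (m : Int) (x : Int) (y : Int) (queries : List (Int × Int)) : Int :=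
  loopA n m queries.reverse x y x y

-- ===== PORT B =====
-- 1D reverse pass over the column queries (idx 0 / everything-else-of-the-group = 1); none = impossible
def colLoop (m : Int) : List (Int × Int) → Int → Int → Option Int
  | [], s, e => some (e - s + 1)
  | (idx, power) :: rest, s, e =>
    if idx = 0 then
      if s = 0 then colLoop m rest s (min (m - 1) (e + power))
      else if s + power ≥ m then none
      else colLoop m rest (min (m - 1) (s + power)) (min (m - 1) (e + power))
    else
      if e = m - 1 then colLoop m rest (max 0 (s - power)) e
      else if e - power < 0 then none
      else colLoop m rest (max 0 (s - power)) (max 0 (e - power))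

-- 1D reverse pass over the row queries (idx 2 / the catch-all branch)
def rowLoop (n : Int) : List (Int × Int) → Int → Int → Option Int
  | [], s, e => some (e - s + 1)
  | (idx, power) :: rest, s, e =>
    if idx = 2 then
      if s = 0 then rowLoop n rest s (min (n - 1) (e + power))
      else if s + power ≥ n then none
      else rowLoop n rest (min (n - 1) (s + power)) (min (n - 1) (e + power))
    else
      if e = n - 1 then rowLoop n rest (max 0 (s - power)) e
      else if e + power < 0 then none
      else rowLoop n rest (max 0 (s - power)) (max 0 (e - power))

-- `0 if w is None or h is None else w * h`
def pvCombine (w h : Option Int) : Int :=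
  match w, h with
  | some w, some h => w * h
  | _, _ => 0

def solution_alt (n : Int) (m : Int) (x : Int) (y : Int) (queries : List (Int × Int)) : Int :=
  let rev := queries.reverse
  pvCombine (colLoop m (rev.filter fun q => q.1 == 0 || q.1 == 1) y y)
            (rowLoop n (rev.filter fun q => !(q.1 == 0 || q.1 == 1)) x x)

-- ===== PRECONDITION & SPEC =====
def Spec_solution (n : Int) (m : Int) (x : Int) (y : Int) (queries : List (Int × Int)) (out : Int) : Prop := out = solution_alt n m x y queries
instance (n : Int) (m : Int) (x : Int) (y : Int) (queries : List (Int × Int)) (out : Int) : Decidable (Spec_solution n m x y queries out) := by unfold Spec_solution; infer_instance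

-- ===== CLAIM (what is proved, stated in full; the proofs are below) =====
def Claim_equal_solution : Prop := ∀ (n : Int) (m : Int) (x : Int) (y : Int) (queries : List (Int × Int)), Dom_solution n m x y queries → Spec_solution n m x y queries (solution n m x y queries)

-- ===== LEMMAS AND PROOFS =====

-- the column and row components of A's state evolve independently: one interleaved pass = two filtered passes
theorem loopA_split (n m : Int) (l : List (Int × Int)) :
    ∀ (si sj ei ej : Int),
      loopA n m l si sj ei ej =
        pvCombine (colLoop m (l.filter fun q => q.1 == 0 || q.1 == 1) sj ej)
                  (rowLoop n (l.filter fun q => !(q.1 == 0 || q.1 == 1)) si ei) := by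
  induction l with
  | nil => intro si sj ei ej; simp [loopA, colLoop, rowLoop, pvCombine, Int.mul_comm]
  | cons q rest ih =>
    obtain ⟨idx, power⟩ := q
    intro si sj ei ej
    by_cases h0 : idx = 0
    · subst h0
      simp only [loopA, List.filter, if_pos rfl]
      simp only [show ((0 : Int) == 0 || (0 : Int) == 1) = true by decide, colLoop]
      split_ifs <;> simp [ih, pvCombine]
    · by_cases h1 : idx = 1
      · subst h1
        simp only [loopA, if_neg (by decide : ¬ (1 : Int) = 0), if_pos rfl, List.filter]
        simp only [show ((1 : Int) == 0 || (1 : Int) == 1) = true by decide, colLoop,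
          if_neg (by decide : ¬ (1 : Int) = 0)]
        split_ifs <;> simp [ih, pvCombine]
      · have hb : (idx == 0 || idx == 1) = false := by
          simp [h0, h1]
        by_cases h2 : idx = 2
        · subst h2
          simp only [loopA, if_neg (by decide : ¬ (2 : Int) = 0),
            if_neg (by decide : ¬ (2 : Int) = 1), List.filter, hb]
          simp only [Bool.not_false, rowLoop]
          split_ifs <;> simp [ih, pvCombine]
        · simp only [loopA, if_neg h0, if_neg h1, if_neg h2, List.filter, hb]
          simp only [Bool.not_false, rowLoop, if_neg h2]
          split_ifs <;> simp [ih, pvCombine]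

-- ===== VERDICT (by name: the statement is the Claim_ definition above) =====
theorem solution_spec : Claim_equal_solution := by
  intro n m x y queries _
  unfold Spec_solution solution solution_alt
  exact loopA_split n m queries.reverse x y x y
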